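-- pv_equiv track=rewrite | github.com/HeeSung98/Baekjoon | 프로그래머스/1/42862. 체육복/체육복.py | solution
-- ===== SOURCE A (Python) =====
-- def solution(n, lost, reserve):
--     # 여벌 체육복을 가져온 학생이 도난당한 경우를 먼저 제거
--     lost_set = set(lost) - set(reserve)
--     reserve_set = set(reserve) - set(lost)
--
--     # 체육복 빌려주기
--     for i in sorted(lost_set):
--         if i - 1 in reserve_set:
--             reserve_set.remove(i - 1)
--         elif i + 1 in reserve_set:
--             reserve_set.remove(i + 1)
--         else:
--             n -= 1  # 체육복을 빌리지 못한 경우, 체육 수업을 들을 수 없는 학생 수 감소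
--
--     return n
-- ===== SOURCE B (Python) =====
-- def solution(n, lost, reserve):
--     ls = sorted(set(lost) - set(reserve))
--     rs = sorted(set(reserve) - set(lost))
--     j = 0
--     for l in ls:
--         while j < len(rs) and rs[j] < l - 1:
--             j += 1
--         if j < len(rs) and (rs[j] == l - 1 or rs[j] == l + 1):
--             j += 1
--         else:
--             n -= 1
--     return n
-- ===== Notes on version B (the rewrite author's own statement) =====
-- stated objective: alternative
-- what changed: Replaces A's per-student membership tests and removals on a mutable reserve set by a single left-to-right two-pointer sweep over the two sorted lists, maintaining only an index into the sorted reserve list.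
import Mathlib
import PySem

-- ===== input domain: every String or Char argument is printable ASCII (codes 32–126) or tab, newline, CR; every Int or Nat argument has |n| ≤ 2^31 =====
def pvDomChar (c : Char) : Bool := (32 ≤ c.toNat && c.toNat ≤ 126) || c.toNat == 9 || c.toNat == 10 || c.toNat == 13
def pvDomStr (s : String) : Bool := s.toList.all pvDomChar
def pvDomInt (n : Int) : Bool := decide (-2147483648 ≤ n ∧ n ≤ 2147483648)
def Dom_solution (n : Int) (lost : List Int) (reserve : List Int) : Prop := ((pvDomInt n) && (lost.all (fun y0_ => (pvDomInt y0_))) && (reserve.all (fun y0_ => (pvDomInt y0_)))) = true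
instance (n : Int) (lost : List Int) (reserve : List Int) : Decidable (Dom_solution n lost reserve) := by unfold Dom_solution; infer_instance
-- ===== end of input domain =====

-- B replaces A's repeated set-membership tests and removals by one two-pointer sweep
-- over the two sorted lists (objective: alternative single-pass algorithm, same cost class).

-- ===== PORT A =====
-- loop body of A's for-loop (state: (n, reserve_set))
def aStep (st : Int × PySem.Set Int) (i : Int) : Int × PySem.Set Int :=
  if PySem.Set.contains st.2 (i - 1) then
    (st.1, (PySem.Set.remove? st.2 (i - 1)).getD st.2)
  else if PySem.Set.contains st.2 (i + 1) then
    (st.1, (PySem.Set.remove? st.2 (i + 1)).getD st.2)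
  else (st.1 - 1, st.2)

def solution (n : Int) (lost : List Int) (reserve : List Int) : Int :=
  let lostSet : PySem.Set Int := PySem.Set.diff (PySem.Set.ofList lost) (PySem.Set.ofList reserve)
  let reserveSet : PySem.Set Int := PySem.Set.diff (PySem.Set.ofList reserve) (PySem.Set.ofList lost)
  ((PySem.List.sorted lostSet (fun x => x) false).foldl aStep (n, reserveSet)).1

-- ===== PORT B =====
-- the inner 'while j < len(rs) and rs[j] < t: j += 1' loop of Source B
def skipIdx (rs : List Int) (t : Int) (j : Nat) : Nat :=
  if h : j < rs.length ∧ rs.getD j 0 < t then skipIdx rs t (j + 1) else j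
termination_by rs.length - j
decreasing_by omega

-- loop body of B's for-loop (state: (n, j))
def bStep (rs : List Int) (st : Int × Nat) (l : Int) : Int × Nat :=
  let j := skipIdx rs (l - 1) st.2
  if j < rs.length ∧ (rs.getD j 0 = l - 1 ∨ rs.getD j 0 = l + 1) then (st.1, j + 1)
  else (st.1 - 1, j)

def solution_alt (n : Int) (lost : List Int) (reserve : List Int) : Int :=
  let ls := PySem.List.sorted (PySem.Set.diff (PySem.Set.ofList lost) (PySem.Set.ofList reserve)) (fun x => x) false
  let rs := PySem.List.sorted (PySem.Set.diff (PySem.Set.ofList reserve) (PySem.Set.ofList lost)) (fun x => x) false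
  (ls.foldl (bStep rs) (n, 0)).1

-- ===== PRECONDITION & SPEC =====
def Spec_solution (n : Int) (lost : List Int) (reserve : List Int) (out : Int) : Prop := out = solution_alt n lost reserve
instance (n : Int) (lost : List Int) (reserve : List Int) (out : Int) : Decidable (Spec_solution n lost reserve out) := by unfold Spec_solution; infer_instance

-- ===== CLAIM (what is proved, stated in full; the proofs are below) =====
def Claim_equal_solution : Prop := ∀ (n : Int) (lost : List Int) (reserve : List Int), Dom_solution n lost reserve → Spec_solution n lost reserve (solution n lost reserve)

-- ===== LEMMAS AND PROOFS =====

lemma skipIdx_ge (rs : List Int) (t : Int) (j : Nat) : j ≤ skipIdx rs t j := by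
  rw [skipIdx]
  by_cases h : j < rs.length ∧ rs.getD j 0 < t
  · rw [dif_pos h]
    exact le_trans (Nat.le_succ j) (skipIdx_ge rs t (j + 1))
  · rw [dif_neg h]
termination_by rs.length - j
decreasing_by omega

lemma skipIdx_le (rs : List Int) (t : Int) (j : Nat) (hj : j ≤ rs.length) :
    skipIdx rs t j ≤ rs.length := by
  rw [skipIdx]
  by_cases h : j < rs.length ∧ rs.getD j 0 < t
  · rw [dif_pos h]
    exact skipIdx_le rs t (j + 1) h.1
  · rw [dif_neg h]; exact hj
termination_by rs.length - j
decreasing_by omega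

lemma skipIdx_stop (rs : List Int) (t : Int) (j : Nat) :
    skipIdx rs t j < rs.length → ¬ rs.getD (skipIdx rs t j) 0 < t := by
  rw [skipIdx]
  by_cases h : j < rs.length ∧ rs.getD j 0 < t
  · rw [dif_pos h]
    exact skipIdx_stop rs t (j + 1)
  · rw [dif_neg h]
    intro hlt hcon
    exact h ⟨hlt, hcon⟩
termination_by rs.length - j
decreasing_by omega

lemma skipIdx_skipped (rs : List Int) (t : Int) (j : Nat) :
    ∀ k, j ≤ k → k < skipIdx rs t j → rs.getD k 0 < t := by
  rw [skipIdx]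
  by_cases h : j < rs.length ∧ rs.getD j 0 < t
  · rw [dif_pos h]
    intro k hk1 hk2
    rcases Nat.eq_or_lt_of_le hk1 with heq | hlt
    · exact heq ▸ h.2
    · exact skipIdx_skipped rs t (j + 1) k hlt hk2
  · rw [dif_neg h]
    intro k h1 h2
    omega
termination_by rs.length - j
decreasing_by omega

-- the main loop invariant: A's remaining reserve set equals the not-yet-reached suffix
-- rs.drop j of the sorted reserve list together with a junk set U of elements too small
-- to ever be lent again
lemma loop_eq (rs : List Int) (hrs : rs.Pairwise (· < ·)) (ls : List Int) :
    ∀ (n : Int) (S U : List Int) (j : Nat),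
    ls.Pairwise (· < ·) →
    (∀ x : Int, x ∈ S ↔ x ∈ U ∨ x ∈ rs.drop j) →
    (∀ u ∈ U, ∀ l ∈ ls, u < l - 1) →
    (∀ l ∈ ls, l ∉ S) →
    j ≤ rs.length →
    (ls.foldl aStep (n, S)).1 = (ls.foldl (bStep rs) (n, j)).1 := by
  induction ls with
  | nil => intros; rfl
  | cons l ltail ih =>
    intro n S U j hls hS hU hdisj hjlen
    simp only [List.foldl_cons]
    set j' := skipIdx rs (l - 1) j with hj'def
    have hjj' : j ≤ j' := skipIdx_ge rs (l - 1) j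
    have hj'len : j' ≤ rs.length := skipIdx_le rs (l - 1) j hjlen
    -- enlarged junk set
    set U' : List Int := U ++ (List.take (j' - j) (rs.drop j)) with hU'def
    have hsplit : rs.drop j = (rs.drop j).take (j' - j) ++ rs.drop j' := by
      conv_lhs => rw [← List.take_append_drop (j' - j) (rs.drop j)]
      rw [List.drop_drop]
      have heq : j + (j' - j) = j' := by omega
      rw [heq]
    have hS' : ∀ x : Int, x ∈ S ↔ x ∈ U' ∨ x ∈ rs.drop j' := by
      intro x
      rw [hS x, hsplit, hU'def]
      simp only [List.mem_append]
      tauto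
    have hU'lt : ∀ u ∈ U', u < l - 1 := by
      intro u hu
      rw [hU'def, List.mem_append] at hu
      rcases hu with hu | hu
      · exact hU u hu l (List.mem_cons_self)
      · obtain ⟨i, hilen, hieq⟩ := List.mem_iff_getElem.mp hu
        have hlen' : i < min (j' - j) (rs.length - j) := by
          simpa only [List.length_take, List.length_drop] using hilen
        have hlen1 : i < j' - j := by omega
        have hlen2 : j + i < rs.length := by omega
        have hval : ((rs.drop j).take (j' - j))[i]'hilen = rs[j + i]'hlen2 := by
          rw [List.getElem_take, List.getElem_drop]
        have := skipIdx_skipped rs (l - 1) j (j + i) (by omega) (by omega)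
        rw [List.getD_eq_getElem rs 0 hlen2] at this
        rw [← hval, hieq] at this
        exact this
    have hUtail : ∀ u ∈ U', ∀ l' ∈ ltail, u < l' - 1 := by
      intro u hu l' hl'
      have h1 := hU'lt u hu
      have h2 : l < l' := (List.pairwise_cons.mp hls).1 l' hl'
      omega
    have hlstail : ltail.Pairwise (· < ·) := (List.pairwise_cons.mp hls).2
    by_cases hlen : j' < rs.length
    · have hdropcons : rs.drop j' = rs[j']'hlen :: rs.drop (j' + 1) :=
        List.drop_eq_getElem_cons hlen
      have hgetD : rs.getD j' 0 = rs[j']'hlen := List.getD_eq_getElem rs 0 hlen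
      have htail_gt : ∀ y ∈ rs.drop (j' + 1), rs[j']'hlen < y := by
        have hp := hrs.drop (i := j')
        rw [hdropcons] at hp
        exact (List.pairwise_cons.mp hp).1
      have hstop : ¬ rs.getD j' 0 < l - 1 := skipIdx_stop rs (l - 1) j hlen
      rw [hgetD] at hstop
      have hheadmem : rs[j']'hlen ∈ S := (hS' _).mpr (Or.inr (by rw [hdropcons]; exact List.mem_cons_self))
      have hhead_ne_l : rs[j']'hlen ≠ l := by
        intro he
        exact hdisj l List.mem_cons_self (he ▸ hheadmem)
      by_cases h1 : rs[j']'hlen = l - 1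
      · -- lend left neighbour's spare
        have hmem : (l - 1) ∈ S := h1 ▸ hheadmem
        have ha : aStep (n, S) l = (n, PySem.Set.discard S (l - 1)) := by
          simp only [aStep]
          rw [if_pos ((PySem.Set.contains_iff _ _).mpr hmem),
              PySem.Set.remove?_of_mem hmem, Option.getD_some]
        have hb : bStep rs (n, j) l = (n, j' + 1) := by
          simp only [bStep, ← hj'def]
          rw [if_pos ⟨hlen, Or.inl (by rw [hgetD, h1])⟩]
        rw [ha, hb]
        apply ih n (PySem.Set.discard S (l - 1)) U' (j' + 1) hlstail
        · intro x
          rw [PySem.Set.mem_discard, hS' x, hdropcons]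
          simp only [List.mem_cons]
          constructor
          · rintro ⟨hx | hx | hx, hne⟩
            · exact Or.inl hx
            · exact absurd (h1 ▸ hx) hne
            · exact Or.inr hx
          · rintro (hx | hx)
            · exact ⟨Or.inl hx, by have := hU'lt x hx; omega⟩
            · refine ⟨Or.inr (Or.inr hx), ?_⟩
              have := htail_gt x hx
              omega
        · exact hUtail
        · intro l' hl' hmem'
          exact hdisj l' (List.mem_cons_of_mem l hl') ((PySem.Set.mem_discard S _ l').mp hmem').1
        · omega
      · have hgt1 : l - 1 < rs[j']'hlen := lt_of_le_of_ne (not_lt.mp hstop) (Ne.symm h1)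
        have hge : l + 1 ≤ rs[j']'hlen := by
          have := hhead_ne_l
          omega
        have hnot1 : (l - 1) ∉ S := by
          rw [hS']
          rintro (hx | hx)
          · have := hU'lt _ hx; omega
          · rw [hdropcons, List.mem_cons] at hx
            rcases hx with hx | hx
            · exact h1 (by omega)
            · have := htail_gt _ hx; omega
        have hc1 : ¬ (PySem.Set.contains S (l - 1) = true) := fun h =>
          hnot1 ((PySem.Set.contains_iff _ _).mp h)
        by_cases h2 : rs[j']'hlen = l + 1
        · -- lend right neighbour's spare
          have hmem : (l + 1) ∈ S := h2 ▸ hheadmem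
          have ha : aStep (n, S) l = (n, PySem.Set.discard S (l + 1)) := by
            simp only [aStep]
            rw [if_neg hc1, if_pos ((PySem.Set.contains_iff _ _).mpr hmem),
                PySem.Set.remove?_of_mem hmem, Option.getD_some]
          have hb : bStep rs (n, j) l = (n, j' + 1) := by
            simp only [bStep, ← hj'def]
            rw [if_pos ⟨hlen, Or.inr (by rw [hgetD, h2])⟩]
          rw [ha, hb]
          apply ih n (PySem.Set.discard S (l + 1)) U' (j' + 1) hlstail
          · intro x
            rw [PySem.Set.mem_discard, hS' x, hdropcons]
            simp only [List.mem_cons]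
            constructor
            · rintro ⟨hx | hx | hx, hne⟩
              · exact Or.inl hx
              · exact absurd (h2 ▸ hx) hne
              · exact Or.inr hx
            · rintro (hx | hx)
              · exact ⟨Or.inl hx, by have := hU'lt x hx; omega⟩
              · refine ⟨Or.inr (Or.inr hx), ?_⟩
                have := htail_gt x hx
                omega
          · exact hUtail
          · intro l' hl' hmem'
            exact hdisj l' (List.mem_cons_of_mem l hl') ((PySem.Set.mem_discard S _ l').mp hmem').1
          · omega
        · -- nobody to lend: both count the student out
          have hnot2 : (l + 1) ∉ S := by
            rw [hS']
            rintro (hx | hx)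
            · have := hU'lt _ hx; omega
            · rw [hdropcons, List.mem_cons] at hx
              rcases hx with hx | hx
              · exact h2 (by omega)
              · have h3 := htail_gt _ hx
                have : rs[j']'hlen ≠ l + 1 := h2
                omega
          have hc2 : ¬ (PySem.Set.contains S (l + 1) = true) := fun h =>
            hnot2 ((PySem.Set.contains_iff _ _).mp h)
          have ha : aStep (n, S) l = (n - 1, S) := by
            simp only [aStep]
            rw [if_neg hc1, if_neg hc2]
          have hb : bStep rs (n, j) l = (n - 1, j') := by
            simp only [bStep, ← hj'def]
            rw [if_neg]
            rintro ⟨-, hor | hor⟩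
            · rw [hgetD] at hor; exact h1 hor
            · rw [hgetD] at hor; exact h2 hor
          rw [ha, hb]
          apply ih (n - 1) S U' j' hlstail hS' hUtail
          · intro l' hl'
            exact hdisj l' (List.mem_cons_of_mem l hl')
          · exact hj'len
    · -- reserve exhausted
      have hj'eq : j' = rs.length := by omega
      have hdropnil : rs.drop j' = [] := by
        rw [hj'eq, List.drop_length]
      have hnot1 : (l - 1) ∉ S := by
        rw [hS', hdropnil]
        rintro (hx | hx)
        · have := hU'lt _ hx; omega
        · cases hx
      have hnot2 : (l + 1) ∉ S := by
        rw [hS', hdropnil]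
        rintro (hx | hx)
        · have := hU'lt _ hx; omega
        · cases hx
      have ha : aStep (n, S) l = (n - 1, S) := by
        simp only [aStep]
        rw [if_neg (fun h => hnot1 ((PySem.Set.contains_iff _ _).mp h)),
            if_neg (fun h => hnot2 ((PySem.Set.contains_iff _ _).mp h))]
      have hb : bStep rs (n, j) l = (n - 1, j') := by
        simp only [bStep, ← hj'def]
        rw [if_neg]
        rintro ⟨hcon, -⟩
        exact hlen hcon
      rw [ha, hb]
      apply ih (n - 1) S U' j' hlstail hS' hUtail
      · intro l' hl'
        exact hdisj l' (List.mem_cons_of_mem l hl')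
      · exact hj'len

lemma pairwise_lt_sorted (xs : List Int) (hx : xs.Nodup) :
    (PySem.List.sorted xs (fun x => x) false).Pairwise (· < ·) := by
  have hle := PySem.List.sorted_pairwise xs (fun x => x)
  have hperm := PySem.List.sorted_perm xs (fun x => x) false
  have hnd : (PySem.List.sorted xs (fun x => x) false).Nodup := hperm.nodup_iff.mpr hx
  exact (hle.and hnd).imp (fun h => lt_of_le_of_ne h.1 h.2)

-- ===== VERDICT (by name: the statement is the Claim_ definition above) =====
theorem solution_spec : Claim_equal_solution := by
  intro n lost reserve _
  simp only [Spec_solution, solution, solution_alt]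
  set lostSet : PySem.Set Int := PySem.Set.diff (PySem.Set.ofList lost) (PySem.Set.ofList reserve) with hls
  set reserveSet : PySem.Set Int := PySem.Set.diff (PySem.Set.ofList reserve) (PySem.Set.ofList lost) with hrs
  refine loop_eq _ ?_ _ n reserveSet [] 0 ?_ ?_ ?_ ?_ ?_
  · exact pairwise_lt_sorted reserveSet
      (PySem.Set.nodup_diff _ _ (PySem.Set.nodup_ofList reserve))
  · exact pairwise_lt_sorted lostSet
      (PySem.Set.nodup_diff _ _ (PySem.Set.nodup_ofList lost))
  · intro x
    rw [List.drop_zero, PySem.List.mem_sorted]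
    simp
  · intro u hu
    cases hu
  · intro l hl hmem
    rw [PySem.List.mem_sorted] at hl
    rw [hls, PySem.Set.mem_diff, PySem.Set.mem_ofList, PySem.Set.mem_ofList] at hl
    rw [hrs, PySem.Set.mem_diff, PySem.Set.mem_ofList, PySem.Set.mem_ofList] at hmem
    exact hmem.2 hl.1
  · exact Nat.zero_le _
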